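-- pv_equiv track=rewrite | github.com/sinus-x/rubbergoddess | cogs/karma/karma.py | _emojis_to_message
-- ===== SOURCE A (Python) =====
-- from typing import List, Union
--
-- def _emojis_to_message(emotes: list) -> List[str]:
--     line = ""
--     result = []
--     for i, emote in enumerate(emotes):
--         if i % 8 == 0:
--             result.append(line)
--             line = ""
--         line += f"{emote} "
--     result.append(line)
--
--     return [r for r in result if len(r) > 0]
-- ===== SOURCE B (Python) =====
-- def _emojis_to_message(emotes: list):
--     result = []
--     i = 0
--     while i < len(emotes):
--         line = ""
--         for e in emotes[i : i + 8]:
--             line += f"{e} "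
--         result.append(line)
--         i += 8
--     return result
-- ===== Notes on version B (the rewrite author's own statement) =====
-- stated objective: simpler
-- what changed: Replaces the enumerate/modulo-8 branch with an empty sentinel line and a final non-empty filter by a direct stride-8 slicing loop that builds each line per chunk, needing no sentinel and no filter.
import Mathlib
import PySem

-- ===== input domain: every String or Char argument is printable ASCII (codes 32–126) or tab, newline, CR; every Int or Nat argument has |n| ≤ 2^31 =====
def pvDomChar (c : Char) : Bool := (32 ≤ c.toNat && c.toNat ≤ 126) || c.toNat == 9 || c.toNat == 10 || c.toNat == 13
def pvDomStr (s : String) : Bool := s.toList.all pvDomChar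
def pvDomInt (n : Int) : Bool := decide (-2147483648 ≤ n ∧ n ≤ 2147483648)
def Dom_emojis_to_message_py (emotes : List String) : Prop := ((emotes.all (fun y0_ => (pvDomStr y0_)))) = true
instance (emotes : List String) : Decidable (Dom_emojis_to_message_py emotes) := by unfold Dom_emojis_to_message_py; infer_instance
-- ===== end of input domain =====

-- B replaces A's enumerate/mod-8 branching with its empty-sentinel line and final
-- non-empty filter by a direct stride-8 slicing loop (no sentinel, no filter): simpler.

-- ===== PORT A =====
-- the enumerate loop: state is (line, result); on i % 8 == 0 push line and reset it,
-- then always line += f"{emote} "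
def emojis_to_message_py (emotes : List String) : List String :=
  let st := (PySem.List.enumerate emotes 0).foldl
    (fun (st : String × List String) (p : Int × String) =>
      let st' := if p.1 % 8 == 0 then ("", st.2 ++ [st.1]) else st
      (st'.1 ++ (p.2 ++ " "), st'.2))
    ("", [])
  -- result.append(line); [r for r in result if len(r) > 0]
  (st.2 ++ [st.1]).filter (fun r => decide (0 < PySem.Str.len r))

-- ===== PORT B =====
-- while i < len(emotes): build line from the slice emotes[i:i+8], append it, i += 8
def emojis_to_message_py_alt_go (emotes : List String) (i : Nat) (result : List String) :
    List String :=
  if i < emotes.length then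
    emojis_to_message_py_alt_go emotes (i + 8)
      (result ++ [(PySem.List.slice emotes (some (i : Int)) (some ((i : Int) + 8))).foldl
        (fun line e => line ++ (e ++ " ")) ""])
  else result
termination_by emotes.length - i

def emojis_to_message_py_alt (emotes : List String) : List String :=
  emojis_to_message_py_alt_go emotes 0 []

-- ===== PRECONDITION & SPEC =====
def Spec_emojis_to_message_py (emotes : List String) (out : List String) : Prop := out = emojis_to_message_py_alt emotes
instance (emotes : List String) (out : List String) : Decidable (Spec_emojis_to_message_py emotes out) := by unfold Spec_emojis_to_message_py; infer_instance

-- ===== CLAIM (what is proved, stated in full; the proofs are below) =====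
def Claim_equal_emojis_to_message_py : Prop := ∀ (emotes : List String), Dom_emojis_to_message_py emotes → Spec_emojis_to_message_py emotes (emojis_to_message_py emotes)

-- ===== LEMMAS AND PROOFS =====

-- the line-building step shared by both loops
def pvG (a e : String) : String := a ++ (e ++ " ")

-- A's loop as structural recursion over the list with an explicit index
def pvLoopA : List String → Int → String → List String → String × List String
  | [], _, line, res => (line, res)
  | e :: rest, i, line, res =>
    if i % 8 == 0 then pvLoopA rest (i + 1) (pvG "" e) (res ++ [line])
    else pvLoopA rest (i + 1) (pvG line e) res

-- the chunk view both loops reduce to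
def pvChunks : List String → List String
  | [] => []
  | x :: xs => ((x :: xs).take 8).foldl pvG "" :: pvChunks ((x :: xs).drop 8)
termination_by xs => xs.length
decreasing_by simp

def pvPred (r : String) : Bool := decide (0 < PySem.Str.len r)

lemma pvChunks_nil : pvChunks [] = [] := by unfold pvChunks; rfl

lemma pvChunks_cons (x : String) (xs : List String) :
    pvChunks (x :: xs) = ((x :: xs).take 8).foldl pvG "" :: pvChunks ((x :: xs).drop 8) := by
  conv_lhs => unfold pvChunks

lemma pvFoldA_eq (xs : List String) : ∀ (s : Int) (line : String) (res : List String),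
    (PySem.List.enumerate xs s).foldl
      (fun (st : String × List String) (p : Int × String) =>
        let st' := if p.1 % 8 == 0 then ("", st.2 ++ [st.1]) else st
        (st'.1 ++ (p.2 ++ " "), st'.2))
      (line, res) = pvLoopA xs s line res := by
  induction xs with
  | nil => intro s line res; simp [PySem.List.enumerate, pvLoopA]
  | cons e rest ih =>
    intro s line res
    simp only [PySem.List.enumerate, List.foldl_cons, pvLoopA]
    by_cases h : (s % 8 == 0) = true
    · simp only [h, if_pos, ih]; rfl
    · simp only [eq_false_of_ne_true h, if_neg, Bool.false_eq_true, not_false_iff, ih]; rfl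

lemma pvLoopA_run : ∀ (c rest : List String) (i : Int) (line : String) (res : List String),
    (∀ j : Nat, j < c.length → (i + j) % 8 ≠ 0) →
    pvLoopA (c ++ rest) i line res = pvLoopA rest (i + c.length) (c.foldl pvG line) res := by
  intro c
  induction c with
  | nil => intro rest i line res _; simp
  | cons e c' ih =>
    intro rest i line res h
    have h0 : ¬ (i % 8 == 0) = true := by
      have := h 0 (by simp)
      simpa using this
    simp only [List.cons_append, pvLoopA, if_neg h0, List.foldl_cons]
    rw [ih]
    · congr 1
      simp only [List.length_cons]
      push_cast
      ring
    · intro j hj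
      have hne := h (j + 1) (by simpa using Nat.succ_lt_succ hj)
      intro hc
      apply hne
      rw [← hc]
      congr 1
      push_cast
      ring

lemma pvLen_foldl_ge (c : List String) : ∀ (s : String),
    s.toList.length ≤ ((c.foldl pvG s)).toList.length := by
  induction c with
  | nil => intro s; simp
  | cons e c' ih =>
    intro s
    calc s.toList.length ≤ (pvG s e).toList.length := by
          simp [pvG, String.toList_append]
      _ ≤ _ := ih (pvG s e)

lemma pvPred_chunk (e : String) (c : List String) :
    pvPred ((e :: c).foldl pvG "") = true := by
  simp only [pvPred, PySem.Str.len_eq, decide_eq_true_eq]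
  have h1 : (pvG "" e).toList.length ≤ (((e :: c).foldl pvG "")).toList.length := by
    simpa using pvLen_foldl_ge c (pvG "" e)
  have h2 : 1 ≤ (pvG "" e).toList.length := by
    simp [pvG, String.toList_append]
  exact_mod_cast Nat.lt_of_lt_of_le (by omega) h1

lemma pvPred_empty : pvPred "" = false := by
  simp [pvPred, PySem.Str.len_eq]

lemma pvMainA : ∀ (n : Nat) (emotes : List String), emotes.length ≤ n →
    ∀ (i : Int) (line : String) (res : List String), i % 8 = 0 →
    ((pvLoopA emotes i line res).2 ++ [(pvLoopA emotes i line res).1]).filter pvPred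
      = (res ++ [line]).filter pvPred ++ pvChunks emotes := by
  intro n
  induction n with
  | zero =>
    intro emotes hlen i line res _
    have : emotes = [] := List.length_eq_zero_iff.mp (Nat.le_zero.mp hlen)
    subst this
    simp [pvLoopA, pvChunks_nil]
  | succ n ih =>
    intro emotes hlen i line res hi
    cases emotes with
    | nil => simp [pvLoopA, pvChunks_nil]
    | cons e rest0 =>
      simp only [List.length_cons] at hlen
      have hiz : (i % 8 == 0) = true := by simpa using hi
      have step1 : pvLoopA (e :: rest0) i line res
          = pvLoopA rest0 (i + 1) (pvG "" e) (res ++ [line]) := by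
        simp [pvLoopA, hiz]
      have hsplit : rest0 = rest0.take 7 ++ rest0.drop 7 := (List.take_append_drop 7 rest0).symm
      have step2 : pvLoopA rest0 (i + 1) (pvG "" e) (res ++ [line])
          = pvLoopA (rest0.drop 7) (i + 1 + (rest0.take 7).length)
              ((rest0.take 7).foldl pvG (pvG "" e)) (res ++ [line]) := by
        conv_lhs => rw [hsplit]
        apply pvLoopA_run
        intro j hj
        have hj7 : j < 7 := lt_of_lt_of_le hj (by simp)
        omega
      have hchunkline : ((e :: rest0).take 8).foldl pvG ""
          = (rest0.take 7).foldl pvG (pvG "" e) := by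
        simp [List.take_succ_cons, List.foldl_cons]
      have hchunkdrop : (e :: rest0).drop 8 = rest0.drop 7 := by
        simp [List.drop_succ_cons]
      have hchunks : pvChunks (e :: rest0)
          = ((e :: rest0).take 8).foldl pvG "" :: pvChunks (rest0.drop 7) := by
        rw [pvChunks_cons, hchunkdrop]
      have hpredL : pvPred ((rest0.take 7).foldl pvG (pvG "" e)) = true :=
        pvPred_chunk e (rest0.take 7)
      by_cases hshort : rest0.length ≤ 7
      · -- drop 7 = [] : the loop ends here
        have hd : rest0.drop 7 = [] := List.drop_eq_nil_of_le hshort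
        rw [step1, step2, hd]
        simp only [pvLoopA, hchunks, hd, pvChunks_nil]
        rw [List.filter_append, List.filter_append]
        simp [hpredL]
      · -- a full chunk of 8 was consumed; recurse
        have hlen7 : (rest0.take 7).length = 7 := by
          rw [List.length_take]; omega
        have hmod : (i + 1 + ((rest0.take 7).length : Int)) % 8 = 0 := by
          rw [hlen7]; push_cast; omega
        have hrec := ih (rest0.drop 7)
          (by rw [List.length_drop]; omega)
          (i + 1 + ((rest0.take 7).length : Int))
          ((rest0.take 7).foldl pvG (pvG "" e)) (res ++ [line]) hmod
        rw [step1, step2, hrec, hchunks]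
        rw [List.filter_append (l₂ := [(rest0.take 7).foldl pvG (pvG "" e)]),
            List.filter_append (l₂ := [line])]
        simp [hpredL]

lemma pvAltGo_eq : ∀ (n : Nat) (emotes : List String) (i : Nat), emotes.length - i ≤ n →
    ∀ (res : List String),
    emojis_to_message_py_alt_go emotes i res = res ++ pvChunks (emotes.drop i) := by
  intro n
  induction n with
  | zero =>
    intro emotes i hlen res
    rw [emojis_to_message_py_alt_go, if_neg (by omega)]
    rw [List.drop_eq_nil_of_le (by omega), pvChunks_nil]
    simp
  | succ n ih =>
    intro emotes i hlen res
    by_cases hlt : i < emotes.length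
    · rw [emojis_to_message_py_alt_go, if_pos hlt]
      have hslice : PySem.List.slice emotes (some (i : Int)) (some ((i : Int) + 8))
          = (emotes.drop i).take 8 := by
        have h8 : ((i : Int) + 8) = ((i : Int) + ((8 : Nat) : Int)) := by push_cast; ring
        rw [h8]
        exact PySem.List.slice_natCast_add emotes i 8
      rw [ih emotes (i + 8) (by omega) _]
      have hdd : emotes.drop (i + 8) = (emotes.drop i).drop 8 := by
        rw [List.drop_drop]
      rw [hdd]
      have hne : emotes.drop i ≠ [] := by
        intro hnil
        have := List.drop_eq_nil_iff.mp hnil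
        omega
      obtain ⟨x, xs, hxx⟩ := List.exists_cons_of_ne_nil hne
      rw [hxx, pvChunks_cons, hslice, hxx]
      have hg : (fun (line e : String) => line ++ (e ++ " ")) = pvG := by
        funext a e; rfl
      rw [hg]
      simp
    · rw [emojis_to_message_py_alt_go, if_neg hlt]
      rw [List.drop_eq_nil_of_le (by omega), pvChunks_nil]
      simp

-- ===== VERDICT (by name: the statement is the Claim_ definition above) =====
theorem emojis_to_message_py_spec : Claim_equal_emojis_to_message_py := by
  intro emotes _
  unfold Spec_emojis_to_message_py emojis_to_message_py emojis_to_message_py_alt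
  rw [pvAltGo_eq emotes.length emotes 0 (by omega) []]
  rw [pvFoldA_eq emotes 0 "" []]
  have hfun : (fun r => decide (0 < PySem.Str.len r)) = pvPred := by
    funext r; rfl
  rw [hfun]
  have h := pvMainA emotes.length emotes (le_refl _) 0 "" [] (by decide)
  rw [h]
  simp [pvPred_empty, List.drop_zero]
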